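-- pv_equiv track=rewrite | github.com/edwardtanguay/edwards-projects-former | scripts/qtools/qstr.py | count_tabs_at_front_of_line
-- ===== SOURCE A (Python) =====
-- def count_tabs_at_front_of_line(line: str) -> int:
-- 	count = 0
-- 	for char in line:
-- 		if char == '\t':
-- 			count += 1
-- 		else:
-- 			break
-- 	return count
-- ===== SOURCE B (Python) =====
-- def count_tabs_at_front_of_line(line: str) -> int:
-- 	return len(line) - len(line.lstrip('\t'))
-- ===== Notes on version B (the rewrite author's own statement) =====
-- stated objective: idiomatic
-- what changed: Replaces the explicit counter loop with a closed form: len(line) - len(line.lstrip('\t')), delegating the scan to str.lstrip.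
import Mathlib
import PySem

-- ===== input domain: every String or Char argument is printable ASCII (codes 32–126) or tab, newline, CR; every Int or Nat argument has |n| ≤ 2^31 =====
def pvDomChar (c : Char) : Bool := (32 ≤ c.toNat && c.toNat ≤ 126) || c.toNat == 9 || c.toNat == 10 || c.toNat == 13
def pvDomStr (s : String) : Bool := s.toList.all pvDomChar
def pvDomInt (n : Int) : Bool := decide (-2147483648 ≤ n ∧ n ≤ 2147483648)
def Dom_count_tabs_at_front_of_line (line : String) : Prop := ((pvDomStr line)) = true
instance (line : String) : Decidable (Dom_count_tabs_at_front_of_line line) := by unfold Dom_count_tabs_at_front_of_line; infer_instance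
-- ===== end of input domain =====

-- B computes the leading-tab count in closed form via lstrip instead of A's counter loop with break (idiomatic).


-- ===== PORT A =====
-- literal port of A: the for-loop with break becomes structural recursion carrying the counter
def pvCountLoop : List Char → Int → Int
  | [], count => count
  | ch :: rest, count => if ch = '\t' then pvCountLoop rest (count + 1) else count

def count_tabs_at_front_of_line (line : String) : Int :=
  pvCountLoop line.toList 0

-- ===== PORT B =====
-- port of B: len(line) - len(line.lstrip('\t')); lstrip with a single-char set is exactly dropWhile (== that char)
def count_tabs_at_front_of_line_alt (line : String) : Int :=
  (line.toList.length : Int) - ((line.toList.dropWhile (fun c => c == '\t')).length : Int)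

-- ===== PRECONDITION & SPEC =====
def Spec_count_tabs_at_front_of_line (line : String) (out : Int) : Prop := out = count_tabs_at_front_of_line_alt line
instance (line : String) (out : Int) : Decidable (Spec_count_tabs_at_front_of_line line out) := by unfold Spec_count_tabs_at_front_of_line; infer_instance

-- ===== CLAIM (what is proved, stated in full; the proofs are below) =====
def Claim_equal_count_tabs_at_front_of_line : Prop := ∀ (line : String), Dom_count_tabs_at_front_of_line line → Spec_count_tabs_at_front_of_line line (count_tabs_at_front_of_line line)

-- ===== LEMMAS AND PROOFS =====
theorem pvCountLoop_eq (l : List Char) (c : Int) :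
    pvCountLoop l c = c + ((l.length : Int) - ((l.dropWhile (fun ch => ch == '\t')).length : Int)) := by
  induction l generalizing c with
  | nil => simp [pvCountLoop]
  | cons ch rest ih =>
    by_cases h : ch = '\t'
    · simp [pvCountLoop, h, List.dropWhile, ih]; ring
    · rw [List.dropWhile_cons_of_neg (by simp [h])]; simp [pvCountLoop, h]

-- ===== VERDICT (by name: the statement is the Claim_ definition above) =====
theorem count_tabs_at_front_of_line_spec : Claim_equal_count_tabs_at_front_of_line := by
  intro line _
  unfold Spec_count_tabs_at_front_of_line count_tabs_at_front_of_line count_tabs_at_front_of_line_alt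
  rw [pvCountLoop_eq]; ring
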